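-- pv_equiv track=rewrite | github.com/YSTuran/Server-Client-Deneme | cipher/vigenere.py | extend_key
-- ===== SOURCE A (Python) =====
-- def extend_key(text, key):
--     new_key = ""
--     key_index = 0
--
--     for c in text:
--         if c == " ":
--             new_key += "*"
--         else:
--             new_key += key[key_index % len(key)]
--             key_index += 1
--
--     return new_key
-- ===== SOURCE B (Python) =====
-- def extend_key(text, key):
--     # Gather/scatter: collect the positions of non-space characters, prefill
--     # the output with '*', then scatter the cycled key into those positions.
--     positions = [i for i, c in enumerate(text) if c != " "]
--     out = ["*"] * len(text)
--     for k, i in enumerate(positions):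
--         out[i] = key[k % len(key)]
--     return "".join(out)
-- ===== Notes on version B (the rewrite author's own statement) =====
-- stated objective: alternative
-- what changed: A threads a key counter through one sequential append loop; B is a gather/scatter algorithm: it first gathers the list of non-space positions, prefills an output array with '*', and then scatters the cycled key characters into those positions by index assignment.
import Mathlib
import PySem

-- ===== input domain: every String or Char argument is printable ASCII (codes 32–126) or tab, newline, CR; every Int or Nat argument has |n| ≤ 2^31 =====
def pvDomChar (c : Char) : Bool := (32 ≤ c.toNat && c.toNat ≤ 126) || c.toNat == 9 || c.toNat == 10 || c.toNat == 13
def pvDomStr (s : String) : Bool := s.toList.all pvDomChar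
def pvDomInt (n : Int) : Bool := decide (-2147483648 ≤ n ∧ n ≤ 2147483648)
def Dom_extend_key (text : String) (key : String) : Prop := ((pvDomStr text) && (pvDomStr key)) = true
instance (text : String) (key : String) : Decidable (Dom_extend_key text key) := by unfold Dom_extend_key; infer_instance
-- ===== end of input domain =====

-- B replaces A's sequential counter loop by a gather/scatter decomposition (collect
-- non-space positions, prefill '*', scatter cycled key by index assignment); same cost.

-- ===== PORT A =====
-- A's loop: state (accumulated chars, key_index); on admitted inputs key ≠ [] so
-- key_index % key.length < key.length and getD's default is never used (exact there).
def extendKeyGoA (key : List Char) : List Char → Nat → List Char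
  | [], _ => []
  | c :: rest, i =>
    if c = ' ' then '*' :: extendKeyGoA key rest i
    else key.getD (i % key.length) '*' :: extendKeyGoA key rest (i + 1)

def extend_key (text : String) (key : String) : String :=
  String.ofList (extendKeyGoA key.toList text.toList 0)

-- ===== PORT B =====
-- Source B line by line: the gathered positions, the '*'-prefilled array, the scatter loop.
-- On admitted inputs key ≠ [] whenever positions ≠ [], so pyGetD's default is never used (exact there).
def extend_key_alt (text : String) (key : String) : String :=
  let l := text.toList
  let ky := key.toList
  -- positions = [i for i, c in enumerate(text) if c != " "]
  let positions : List Int := ((PySem.List.enumerate l 0).filter (fun p => p.2 ≠ ' ')).map (·.1)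
  -- out = ["*"] * len(text); for k, i in enumerate(positions): out[i] = key[k % len(key)]
  let out := (PySem.List.enumerate positions 0).foldl
      (fun o kp => PySem.List.pySetD o kp.2
        (PySem.List.pyGetD ky (PySem.Int.mod kp.1 (ky.length : Int)) '*'))
      (List.replicate l.length '*')
  String.ofList out

-- ===== PRECONDITION & SPEC =====
-- Pre_ excludes exactly the inputs where Python A raises ZeroDivisionError:
-- an empty key together with at least one non-space character in text (B raises there too).
def Pre_extend_key (text : String) (key : String) : Prop :=
  key.toList ≠ [] ∨ text.toList.all (fun c => c == ' ') = true
instance (text : String) (key : String) : Decidable (Pre_extend_key text key) := by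
  unfold Pre_extend_key; infer_instance

def pvWitness_extend_key : String × String := ("ab cd", "key")

def Spec_extend_key (text : String) (key : String) (out : String) : Prop := out = extend_key_alt text key
instance (text : String) (key : String) (out : String) : Decidable (Spec_extend_key text key out) := by unfold Spec_extend_key; infer_instance

-- ===== CLAIM (what is proved, stated in full; the proofs are below) =====
def Claim_equal_extend_key : Prop := ∀ (text : String) (key : String), Dom_extend_key text key → Pre_extend_key text key → Spec_extend_key text key (extend_key text key)

-- ===== LEMMAS AND PROOFS =====

-- number of non-space characters among the first j characters
def cntNS (l : List Char) (j : Nat) : Nat := (l.take j).countP (fun c => c ≠ ' ')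

-- the gathered positions, structurally (used only in the proofs)
def nsIdx : List Char → Int → List Int
  | [], _ => []
  | c :: rest, s => if c = ' ' then nsIdx rest (s + 1) else s :: nsIdx rest (s + 1)

theorem positions_eq_nsIdx (l : List Char) (s : Int) :
    (((PySem.List.enumerate l s).filter (fun p => p.2 ≠ ' ')).map (·.1)) = nsIdx l s := by
  induction l generalizing s with
  | nil => simp [nsIdx, PySem.List.enumerate_nil]
  | cons c rest ih =>
    rw [PySem.List.enumerate_cons, List.filter_cons]
    by_cases hc : c = ' '
    · simp only [nsIdx, hc, ne_eq, not_true_eq_false, decide_false, Bool.false_eq_true,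
        ite_true, ite_false]
      rw [← ih (s + 1)]
    · simp only [nsIdx, hc, ne_eq, not_false_eq_true, decide_true, ite_true, ite_false,
        List.map_cons]
      rw [← ih (s + 1)]

theorem nsIdx_ge (l : List Char) (s : Int) : ∀ p ∈ nsIdx l s, s ≤ p := by
  induction l generalizing s with
  | nil => simp [nsIdx]
  | cons c rest ih =>
    intro p hp
    unfold nsIdx at hp
    split at hp
    · have := ih (s + 1) p hp; omega
    · rw [List.mem_cons] at hp
      rcases hp with rfl | hp
      · omega
      · have := ih (s + 1) p hp; omega

theorem nsIdx_nodup (l : List Char) (s : Int) : (nsIdx l s).Nodup := by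
  induction l generalizing s with
  | nil => simp [nsIdx]
  | cons c rest ih =>
    unfold nsIdx
    split
    · exact ih (s + 1)
    · refine List.nodup_cons.mpr ⟨fun h => ?_, ih (s + 1)⟩
      have := nsIdx_ge rest (s + 1) s h; omega

theorem nsIdx_mem (l : List Char) (s : Int) :
    ∀ p ∈ nsIdx l s, ∃ j : Nat, ∃ h : j < l.length, p = s + j ∧ l[j] ≠ ' ' := by
  induction l generalizing s with
  | nil => simp [nsIdx]
  | cons c rest ih =>
    intro p hp
    unfold nsIdx at hp
    have step : p ∈ nsIdx rest (s + 1) →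
        ∃ j : Nat, ∃ h : j < (c :: rest).length, p = s + j ∧ (c :: rest)[j] ≠ ' ' := by
      intro h
      obtain ⟨j, hj, rfl, hne⟩ := ih (s + 1) p h
      exact ⟨j + 1, by simpa using Nat.succ_lt_succ hj, by push_cast; ring, by simpa using hne⟩
    split at hp
    · exact step hp
    · next hc =>
      rw [List.mem_cons] at hp
      rcases hp with rfl | hp
      · exact ⟨0, by simp, by simp, by simpa using hc⟩
      · exact step hp

-- the k-th gathered position carries exactly the running non-space count
theorem nsIdx_enum_mem (l : List Char) (j : Nat) (hj : j < l.length) (hne : l[j] ≠ ' ')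
    (s k0 : Int) :
    (k0 + (cntNS l j : Int), s + (j : Int)) ∈ PySem.List.enumerate (nsIdx l s) k0 := by
  induction l generalizing j s k0 with
  | nil => simp at hj
  | cons c rest ih =>
    cases j with
    | zero =>
      have hc : ¬ c = ' ' := by simpa using hne
      simp [nsIdx, hc, PySem.List.enumerate_cons, cntNS]
    | succ j =>
      have hj' : j < rest.length := by simpa using Nat.lt_of_succ_lt_succ hj
      have hne' : rest[j] ≠ ' ' := by simpa using hne
      by_cases hc : c = ' '
      · have := ih j hj' hne' (s + 1) k0
        have hcnt : cntNS (c :: rest) (j + 1) = cntNS rest j := by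
          simp [cntNS, List.take_succ_cons, hc]
        rw [hcnt]
        simpa [nsIdx, hc, add_assoc, add_comm, add_left_comm] using this
      · have := ih j hj' hne' (s + 1) (k0 + 1)
        have hcnt : (cntNS (c :: rest) (j + 1) : Int) = cntNS rest j + 1 := by
          simp [cntNS, List.take_succ_cons, hc]
        simp only [nsIdx, if_neg hc, PySem.List.enumerate_cons, List.mem_cons]
        right
        have harith : k0 + (cntNS (c :: rest) (j + 1) : Int) = k0 + 1 + (cntNS rest j : Int) := by
          rw [hcnt]; ring
        have harith2 : s + ((j + 1 : Nat) : Int) = s + 1 + (j : Int) := by push_cast; ring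
        rw [harith, harith2]
        exact this

-- a position never written keeps the base value
theorem fold_set_not_mem (ky : List Char) (ps : List Int) (k0 : Int) (out : List Char)
    (j : Nat) (hjm : (j : Int) ∉ ps) (hp0 : ∀ p ∈ ps, 0 ≤ p) :
    ((PySem.List.enumerate ps k0).foldl
      (fun o kp => PySem.List.pySetD o kp.2
        (PySem.List.pyGetD ky (PySem.Int.mod kp.1 (ky.length : Int)) '*')) out).getD j '*'
      = out.getD j '*' := by
  induction ps generalizing k0 out with
  | nil => simp [PySem.List.enumerate_nil]
  | cons p tl ih =>
    rw [PySem.List.enumerate_cons, List.foldl_cons]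
    have hnp : (j : Int) ∉ tl := fun h => hjm (List.mem_cons_of_mem _ h)
    have hp0' : ∀ q ∈ tl, 0 ≤ q := fun q hq => hp0 q (List.mem_cons_of_mem _ hq)
    rw [ih (k0 + 1) _ hnp hp0']
    have hpj : p ≠ (j : Int) := fun h => hjm (h ▸ List.mem_cons_self)
    have hpn : 0 ≤ p := hp0 p List.mem_cons_self
    dsimp only
    rw [PySem.List.pySetD_of_nonneg _ _ hpn]
    have hneq : p.toNat ≠ j := fun h => hpj (by omega)
    simp [List.getD, List.getElem?_set_ne hneq]

theorem length_fold_set (ky : List Char) (ps : List Int) (k0 : Int) (out : List Char) :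
    ((PySem.List.enumerate ps k0).foldl
      (fun o kp => PySem.List.pySetD o kp.2
        (PySem.List.pyGetD ky (PySem.Int.mod kp.1 (ky.length : Int)) '*')) out).length
      = out.length := by
  induction ps generalizing k0 out with
  | nil => simp [PySem.List.enumerate_nil]
  | cons p tl ih =>
    rw [PySem.List.enumerate_cons, List.foldl_cons, ih, PySem.List.length_pySetD]

-- a written position gets its tagged key character (positions distinct, in range)
theorem fold_set_mem (ky : List Char) (ps : List Int) (k0 : Int) (out : List Char)
    (hnd : ps.Nodup) (hp0 : ∀ p ∈ ps, 0 ≤ p) (j : Nat) (hj : j < out.length) (k : Int)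
    (hk : (k, (j : Int)) ∈ PySem.List.enumerate ps k0) :
    ((PySem.List.enumerate ps k0).foldl
      (fun o kp => PySem.List.pySetD o kp.2
        (PySem.List.pyGetD ky (PySem.Int.mod kp.1 (ky.length : Int)) '*')) out).getD j '*'
      = PySem.List.pyGetD ky (PySem.Int.mod k (ky.length : Int)) '*' := by
  induction ps generalizing k0 out with
  | nil => simp [PySem.List.enumerate_nil] at hk
  | cons p tl ih =>
    rw [PySem.List.enumerate_cons, List.foldl_cons]
    rw [PySem.List.enumerate_cons, List.mem_cons] at hk
    rcases hk with hk | hk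
    · rw [Prod.mk.injEq] at hk
      obtain ⟨hk1, hk2⟩ := hk
      obtain ⟨hp, hnd'⟩ := List.nodup_cons.mp hnd
      have hnp : (j : Int) ∉ tl := hk2 ▸ hp
      have hp0' : ∀ q ∈ tl, 0 ≤ q := fun q hq => hp0 q (List.mem_cons_of_mem _ hq)
      rw [fold_set_not_mem ky tl (k0 + 1) _ _ hnp hp0']
      dsimp only
      rw [← hk2, PySem.List.pySetD_of_nonneg _ _ (by omega)]
      have hjt : ((j : Int)).toNat = j := by omega
      rw [hjt, List.getD, List.getElem?_set_self (by omega), Option.getD_some, ← hk1]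
    · have hnd' := (List.nodup_cons.mp hnd).2
      have hp0' : ∀ q ∈ tl, 0 ≤ q := fun q hq => hp0 q (List.mem_cons_of_mem _ hq)
      exact ih (k0 + 1) _ hnd' hp0' (by rw [PySem.List.length_pySetD]; exact hj) hk

-- A's output, pointwise
theorem goA_length (key l : List Char) (i : Nat) :
    (extendKeyGoA key l i).length = l.length := by
  induction l generalizing i with
  | nil => simp [extendKeyGoA]
  | cons c rest ih =>
    unfold extendKeyGoA; split <;> simp [ih]

theorem goA_getD (key l : List Char) (i : Nat) (j : Nat) (hj : j < l.length) :
    (extendKeyGoA key l i).getD j '*'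
      = if l[j] = ' ' then '*' else key.getD ((i + cntNS l j) % key.length) '*' := by
  induction l generalizing i j with
  | nil => simp at hj
  | cons c rest ih =>
    cases j with
    | zero =>
      unfold extendKeyGoA
      by_cases hc : c = ' ' <;> simp [hc, cntNS]
    | succ j =>
      have hj' : j < rest.length := by simpa using Nat.lt_of_succ_lt_succ hj
      unfold extendKeyGoA
      by_cases hc : c = ' '
      · have hcnt : cntNS (c :: rest) (j + 1) = cntNS rest j := by
          simp [cntNS, List.take_succ_cons, hc]
        simp only [if_pos hc, List.getD, List.getElem?_cons_succ]
        rw [← List.getD, ih i j hj', hcnt]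
        simp
      · have hcnt : cntNS (c :: rest) (j + 1) = cntNS rest j + 1 := by
          simp [cntNS, List.take_succ_cons, hc]
        simp only [if_neg hc, List.getD, List.getElem?_cons_succ]
        rw [← List.getD, ih (i + 1) j hj', hcnt]
        have : i + 1 + cntNS rest j = i + (cntNS rest j + 1) := by omega
        simp [this]

-- ===== VERDICT (by name: the statement is the Claim_ definition above) =====
theorem extend_key_spec : Claim_equal_extend_key := by
  unfold Claim_equal_extend_key
  intro text key _ hpre
  unfold Spec_extend_key extend_key extend_key_alt
  simp only []
  set l := text.toList with hl
  set ky := key.toList with hky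
  rw [positions_eq_nsIdx l 0]
  congr 1
  set F := (PySem.List.enumerate (nsIdx l 0) 0).foldl
      (fun o kp => PySem.List.pySetD o kp.2
        (PySem.List.pyGetD ky (PySem.Int.mod kp.1 (ky.length : Int)) '*'))
      (List.replicate l.length '*') with hF
  have hFlen : F.length = l.length := by
    rw [hF, length_fold_set, List.length_replicate]
  have hAlen : (extendKeyGoA ky l 0).length = l.length := goA_length ky l 0
  apply List.ext_getElem (by rw [hAlen, hFlen])
  intro j hja hjf
  have hjl : j < l.length := by rwa [hAlen] at hja
  have hgetA : (extendKeyGoA ky l 0)[j] = (extendKeyGoA ky l 0).getD j '*' := by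
    rw [List.getD, List.getElem?_eq_getElem hja, Option.getD_some]
  have hgetF : F[j] = F.getD j '*' := by
    rw [List.getD, List.getElem?_eq_getElem hjf, Option.getD_some]
  rw [hgetA, hgetF, goA_getD ky l 0 j hjl]
  by_cases hsp : l[j] = ' '
  · rw [if_pos hsp, hF, fold_set_not_mem]
    · simp [List.getD, hjl]
    · intro hm
      obtain ⟨j', hj', hje, hne⟩ := nsIdx_mem l 0 _ hm
      have : j = j' := by omega
      exact hne (this ▸ hsp)
    · exact nsIdx_ge l 0
  · rw [if_neg hsp]
    have hkne : ky ≠ [] := by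
      rcases hpre with h | h
      · exact h
      · exact absurd (by simpa using List.all_eq_true.mp h l[j] (List.getElem_mem hjl)) hsp
    have hkpos : 0 < ky.length := List.length_pos_iff.mpr hkne
    have hmem := nsIdx_enum_mem l j hjl hsp 0 0
    simp only [zero_add] at hmem
    rw [hF, fold_set_mem ky (nsIdx l 0) 0 _ (nsIdx_nodup l 0) (nsIdx_ge l 0) j
        (by rw [List.length_replicate]; exact hjl) _ hmem]
    rw [PySem.Int.mod_natCast, PySem.List.pyGetD_natCast, Nat.zero_add]
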